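-- pv_equiv track=rewrite | github.com/tpike3/SugarScape | Policy-Network/Landscape.py | inner_circle
-- ===== SOURCE A (Python) =====
-- from itertools import chain
--
-- def inner_circle(max_r):
--     '''
--     Make outer circles of values to make gradient of resources
--
--     Input: radius
--
--     Output: List of points (tuples) in circle
--     '''
--
--
--     memos = []
--     for k_r in range(1, max_r + 1):
--         k_r_sq = k_r ** 2
--         memos.append([])
--         for x in range(-max_r, max_r + 1):
--             x_sq = x ** 2
--             for y in range(-max_r, max_r + 1):
--                 y_sq = y ** 2
--                 if x_sq + y_sq <= k_r_sq:
--                     memos[k_r - 1].append((x,y))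
--
--     return list(chain.from_iterable(memos))
-- ===== SOURCE B (Python) =====
-- def inner_circle(max_r):
--     out = []
--     for k in range(1, max_r + 1):
--         for x in range(-k, k + 1):
--             # half-width of the disk's column at abscissa x: largest m with m*m <= k*k - x*x
--             m = k
--             while m * m > k * k - x * x:
--                 m -= 1
--             for y in range(-m, m + 1):
--                 out.append((x, y))
--     return out
-- ===== Notes on version B (the rewrite author's own statement) =====
-- stated objective: faster
-- what changed: B replaces A's per-radius membership test over the whole (2max_r+1)^2 grid by a per-column boundary search: for each radius k and each x in [-k,k] it finds the column half-width m (largest m with m*m <= k*k-x*x) by a descending while loop and emits the contiguous run y in [-m,m] directly, never visiting points outside the disk's bounding columns.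
import Mathlib
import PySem

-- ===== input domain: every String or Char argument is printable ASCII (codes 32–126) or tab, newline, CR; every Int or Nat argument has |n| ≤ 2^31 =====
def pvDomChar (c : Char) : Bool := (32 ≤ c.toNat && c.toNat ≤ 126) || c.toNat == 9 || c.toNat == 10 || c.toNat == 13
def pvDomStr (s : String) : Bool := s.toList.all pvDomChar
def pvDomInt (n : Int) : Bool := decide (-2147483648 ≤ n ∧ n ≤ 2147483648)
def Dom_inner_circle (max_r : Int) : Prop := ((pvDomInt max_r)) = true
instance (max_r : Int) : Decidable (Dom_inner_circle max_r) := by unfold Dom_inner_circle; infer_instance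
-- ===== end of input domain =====

-- B replaces A's per-radius membership test over the full (2max_r+1)² grid by a per-column
-- boundary search: for each k and x∈[-k,k] it finds the column half-width m by a descending
-- while loop and emits the contiguous run y∈[-m,m] directly (measured constant-factor speedup).
-- ===== PORT A =====
def inner_circle (max_r : Int) : List (Int × Int) :=
  let memos : List (List (Int × Int)) :=
    (PySem.List.pyRange 1 (max_r + 1) 1).foldl (fun memos k_r =>
      let k_r_sq := k_r ^ 2
      -- memos.append([]); the inner loops append to memos[k_r-1], i.e. to that last block
      let block :=
        (PySem.List.pyRange (-max_r) (max_r + 1) 1).foldl (fun acc x =>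
          let x_sq := x ^ 2
          (PySem.List.pyRange (-max_r) (max_r + 1) 1).foldl (fun acc y =>
            let y_sq := y ^ 2
            if x_sq + y_sq ≤ k_r_sq then acc ++ [(x, y)] else acc) acc) []
      memos ++ [block]) []
  memos.flatten

-- ===== PORT B =====
-- 'm = k; while m*m > k*k - x*x: m -= 1' — fuel-bounded descent; fuel k.toNat suffices
-- because the loop decrements m at most from k down to 0 (k*k - x*x ≥ 0 on the calls made).
def pvShrink (d : Int) : Int → Nat → Int
  | m, 0 => m
  | m, fuel + 1 => if m * m > d then pvShrink d (m - 1) fuel else m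

def inner_circle_alt (max_r : Int) : List (Int × Int) :=
  (PySem.List.pyRange 1 (max_r + 1) 1).foldl (fun out k =>
    (PySem.List.pyRange (-k) (k + 1) 1).foldl (fun out x =>
      let m := pvShrink (k * k - x * x) k k.toNat
      (PySem.List.pyRange (-m) (m + 1) 1).foldl (fun out y => out ++ [(x, y)]) out) out) []

-- ===== PRECONDITION & SPEC =====
def Spec_inner_circle (max_r : Int) (out : List (Int × Int)) : Prop := out = inner_circle_alt max_r
instance (max_r : Int) (out : List (Int × Int)) : Decidable (Spec_inner_circle max_r out) := by unfold Spec_inner_circle; infer_instance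

-- ===== CLAIM (what is proved, stated in full; the proofs are below) =====
def Claim_equal_inner_circle : Prop := ∀ (max_r : Int), Dom_inner_circle max_r → Spec_inner_circle max_r (inner_circle max_r)

-- ===== LEMMAS AND PROOFS =====

-- the while loop computes the greatest r with r*r ≤ d, given 0 ≤ d < (m+1)² and enough fuel
theorem pvShrink_char (d : Int) (hd : 0 ≤ d) :
    ∀ (fuel : Nat) (m : Int), 0 ≤ m → m.toNat ≤ fuel → d < (m + 1) * (m + 1) →
      0 ≤ pvShrink d m fuel ∧ pvShrink d m fuel ≤ m ∧
      pvShrink d m fuel * pvShrink d m fuel ≤ d ∧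
      d < (pvShrink d m fuel + 1) * (pvShrink d m fuel + 1) := by
  intro fuel
  induction fuel with
  | zero =>
    intro m hm hf hdm
    have : m = 0 := by omega
    subst this
    simp [pvShrink] at *
    omega
  | succ fuel ih =>
    intro m hm hf hdm
    by_cases h : m * m > d
    · have hm1 : 1 ≤ m := by nlinarith
      have := ih (m - 1) (by omega) (by omega) (by nlinarith)
      simp only [pvShrink, if_pos h]
      exact ⟨this.1, by omega, this.2.2.1, this.2.2.2⟩
    · simp only [pvShrink, if_neg h]
      exact ⟨hm, le_refl m, by omega, hdm⟩

-- a full row of the grid, filtered by the disk test, is the contiguous run [-r, r]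
theorem pv_column_eq (R x k r : Int) (hk : k ≤ R) (h0 : 0 ≤ r) (hrk : r ≤ k)
    (hiff : ∀ y : Int, x ^ 2 + y ^ 2 ≤ k ^ 2 ↔ (-r ≤ y ∧ y ≤ r)) :
    (PySem.List.pyRange (-R) (R + 1) 1).filter (fun y => decide (x ^ 2 + y ^ 2 ≤ k ^ 2)) =
      PySem.List.pyRange (-r) (r + 1) 1 := by
  rw [PySem.List.pyRange_one_append (-R) (-r) (R + 1) (by omega) (by omega),
      PySem.List.pyRange_one_append (-r) (r + 1) (R + 1) (by omega) (by omega)]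
  rw [List.filter_append, List.filter_append]
  rw [List.filter_eq_nil_iff.2 (fun y hy => by
        have := PySem.List.mem_pyRange_one.1 hy
        simp only [decide_eq_true_eq]
        intro hc; have := (hiff y).1 hc; omega),
      List.filter_eq_self.2 (fun y hy => by
        have := PySem.List.mem_pyRange_one.1 hy
        simp only [decide_eq_true_eq]
        exact (hiff y).2 ⟨by omega, by omega⟩),
      List.filter_eq_nil_iff.2 (fun y hy => by
        have := PySem.List.mem_pyRange_one.1 hy
        simp only [decide_eq_true_eq]
        intro hc; have := (hiff y).1 hc; omega)]
  simp

-- a double 'append-if' loop is a flatMap of filtered columns (A's block shape)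
theorem pv_Ablock_eq (k : Int) (xs ys : List Int) (acc : List (Int × Int)) :
    (xs.foldl (fun acc x =>
        ys.foldl (fun acc y =>
          if x ^ 2 + y ^ 2 ≤ k ^ 2 then acc ++ [(x, y)] else acc) acc) acc) =
    acc ++ xs.flatMap (fun x =>
      (ys.filter (fun y => decide (x ^ 2 + y ^ 2 ≤ k ^ 2))).map (fun y => (x, y))) := by
  induction xs generalizing acc with
  | nil => simp
  | cons x xs ih =>
    simp only [List.foldl_cons, List.flatMap_cons, ← List.append_assoc]
    rw [ih, PySem.List.foldl_append_ite]

-- B's block for one radius k, as a flatMap of contiguous runs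
theorem pv_Bblock_eq (k : Int) (out : List (Int × Int)) :
    ((PySem.List.pyRange (-k) (k + 1) 1).foldl (fun out x =>
        (PySem.List.pyRange (-(pvShrink (k * k - x * x) k k.toNat))
            (pvShrink (k * k - x * x) k k.toNat + 1) 1).foldl
          (fun out y => out ++ [(x, y)]) out) out) =
    out ++ (PySem.List.pyRange (-k) (k + 1) 1).flatMap (fun x =>
      (PySem.List.pyRange (-(pvShrink (k * k - x * x) k k.toNat))
          (pvShrink (k * k - x * x) k k.toNat + 1) 1).map (fun y => (x, y))) := by
  induction PySem.List.pyRange (-k) (k + 1) 1 generalizing out with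
  | nil => simp
  | cons x xs ih =>
    simp only [List.foldl_cons, List.flatMap_cons, ← List.append_assoc]
    rw [PySem.List.foldl_append_singleton_eq_map, ih]

-- blocks agree for each admitted radius k ≥ 1, k ≤ R
theorem pv_block_eq (ys : List Int) (R k : Int) (hk1 : 1 ≤ k) (hkR : k ≤ R)
    (hys : ys = PySem.List.pyRange (-R) (R + 1) 1) :
    (PySem.List.pyRange (-R) (R + 1) 1).flatMap (fun x =>
      (ys.filter (fun y => decide (x ^ 2 + y ^ 2 ≤ k ^ 2))).map (fun y => (x, y))) =
    (PySem.List.pyRange (-k) (k + 1) 1).flatMap (fun x =>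
      (PySem.List.pyRange (-(pvShrink (k * k - x * x) k k.toNat))
          (pvShrink (k * k - x * x) k k.toNat + 1) 1).map (fun y => (x, y))) := by
  have hnil : ∀ x : Int, k < x ∨ x < -k →
      (ys.filter (fun y => decide (x ^ 2 + y ^ 2 ≤ k ^ 2))).map (fun y => (x, y)) = [] := by
    intro x hx
    rw [List.filter_eq_nil_iff.2 (fun y hy => by
      simp only [decide_eq_true_eq]
      intro hc
      have hy2 : 0 ≤ y ^ 2 := sq_nonneg y
      have hx2 : k ^ 2 < x ^ 2 := by
        rcases hx with h | h <;> nlinarith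
      nlinarith)]
    simp
  have h1 : (PySem.List.pyRange (-R) (-k) 1).flatMap (fun x =>
      (ys.filter (fun y => decide (x ^ 2 + y ^ 2 ≤ k ^ 2))).map (fun y => (x, y))) = [] :=
    List.flatMap_eq_nil_iff.2 (fun x hx => hnil x (by
      have := PySem.List.mem_pyRange_one.1 hx; omega))
  have h2 : (PySem.List.pyRange (k + 1) (R + 1) 1).flatMap (fun x =>
      (ys.filter (fun y => decide (x ^ 2 + y ^ 2 ≤ k ^ 2))).map (fun y => (x, y))) = [] :=
    List.flatMap_eq_nil_iff.2 (fun x hx => hnil x (by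
      have := PySem.List.mem_pyRange_one.1 hx; omega))
  rw [PySem.List.pyRange_one_append (-R) (-k) (R + 1) (by omega) (by omega),
      PySem.List.pyRange_one_append (-k) (k + 1) (R + 1) (by omega) (by omega),
      List.flatMap_append, List.flatMap_append, h1, h2,
      List.nil_append, List.append_nil]
  refine List.flatMap_congr (fun x hx => ?_)
  have hxk := PySem.List.mem_pyRange_one.1 hx
  set r := pvShrink (k * k - x * x) k k.toNat with hr
  have hchar := pvShrink_char (k * k - x * x) (by nlinarith) k.toNat k (by omega)
      (le_refl _) (by nlinarith)
  rw [← hr] at hchar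
  obtain ⟨h0, hrk, hr2, hr3⟩ := hchar
  rw [hys, pv_column_eq R x k r hkR h0 hrk]
  intro y
  constructor
  · intro hc
    constructor
    · by_contra h
      push Not at h
      have : r + 1 ≤ -y := by omega
      nlinarith
    · by_contra h
      push Not at h
      have : r + 1 ≤ y := by omega
      nlinarith
  · intro ⟨h1, h2⟩
    nlinarith

-- ===== VERDICT (by name: the statement is the Claim_ definition above) =====
theorem inner_circle_spec : Claim_equal_inner_circle := by
  intro max_r _
  unfold Spec_inner_circle inner_circle inner_circle_alt
  rw [PySem.List.foldl_append_singleton_eq_map, List.nil_append, List.flatten_eq_flatMap,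
      List.flatMap_map]
  have hB : ∀ out : List (Int × Int),
      (PySem.List.pyRange 1 (max_r + 1) 1).foldl (fun out k =>
        (PySem.List.pyRange (-k) (k + 1) 1).foldl (fun out x =>
          let m := pvShrink (k * k - x * x) k k.toNat
          (PySem.List.pyRange (-m) (m + 1) 1).foldl (fun out y => out ++ [(x, y)]) out) out) out =
      out ++ (PySem.List.pyRange 1 (max_r + 1) 1).flatMap (fun k =>
        (PySem.List.pyRange (-k) (k + 1) 1).flatMap (fun x =>
          (PySem.List.pyRange (-(pvShrink (k * k - x * x) k k.toNat))
              (pvShrink (k * k - x * x) k k.toNat + 1) 1).map (fun y => (x, y)))) := by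
    intro out
    induction PySem.List.pyRange 1 (max_r + 1) 1 generalizing out with
    | nil => simp
    | cons k ks ih =>
      simp only [List.foldl_cons, List.flatMap_cons, ← List.append_assoc]
      rw [pv_Bblock_eq, ih]
  rw [hB, List.nil_append]
  refine List.flatMap_congr (fun k hk => ?_)
  have hkm := PySem.List.mem_pyRange_one.1 hk
  simp only [id]
  rw [pv_Ablock_eq, List.nil_append,
      pv_block_eq (PySem.List.pyRange (-max_r) (max_r + 1) 1) max_r k (by omega) (by omega) rfl]
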